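-- pv_equiv track=rewrite | github.com/mahig1705/esg | core/carbon_validator.py | _resolve_floor_key
-- ===== SOURCE A (Python) =====
-- def _resolve_floor_key(industry: str, floors: dict) -> str:
--     """Resolve the best floor key for an industry with safe matching."""
--     industry = str(industry or "").strip()
--     if not industry:
--         return "Default"
--
--     # Exact match first
--     if industry in floors:
--         return industry
--
--     industry_lower = industry.lower()
--
--     # Case-insensitive exact
--     for key in floors:
--         if key.lower() == industry_lower:
--             return key
--
--     # Normalize separators for loose matching
--     normalized = industry_lower.replace("_", " ").replace("&", "and")
--     for key in floors:
--         key_norm = key.lower().replace("_", " ").replace("&", "and")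
--         if normalized == key_norm:
--             return key
--
--     # Partial match (Technology -> IT / Technology)
--     for key in floors:
--         key_norm = key.lower()
--         if industry_lower in key_norm or key_norm in industry_lower:
--             return key
--
--     return "Default"
-- ===== SOURCE B (Python) =====
-- def _resolve_floor_key(industry: str, floors: dict) -> str:
--     """Single scan: rank every key by match quality, keep the earliest best key."""
--     industry = str(industry or "").strip()
--     if not industry:
--         return "Default"
--     industry_lower = industry.lower()
--     normalized = industry_lower.replace("_", " ").replace("&", "and")
--     best = None  # (level, key); lower level = better match
--     for key in floors:
--         key_lower = key.lower()
--         if key == industry: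
--             level = 0
--         elif key_lower == industry_lower:
--             level = 1
--         elif key_lower.replace("_", " ").replace("&", "and") == normalized:
--             level = 2
--         elif industry_lower in key_lower or key_lower in industry_lower:
--             level = 3
--         else:
--             continue
--         if best is None or level < best[0]:
--             best = (level, key)
--     return best[1] if best is not None else "Default"
-- ===== Notes on version B (the rewrite author's own statement) =====
-- stated objective: alternative
-- what changed: Replaced A's exact-membership test plus three sequential find-first passes over the keys by a single scan that ranks each key by match quality (0 exact, 1 case-insensitive, 2 separator-normalized, 3 substring) and keeps the earliest key at the best rank.
import Mathlib
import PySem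

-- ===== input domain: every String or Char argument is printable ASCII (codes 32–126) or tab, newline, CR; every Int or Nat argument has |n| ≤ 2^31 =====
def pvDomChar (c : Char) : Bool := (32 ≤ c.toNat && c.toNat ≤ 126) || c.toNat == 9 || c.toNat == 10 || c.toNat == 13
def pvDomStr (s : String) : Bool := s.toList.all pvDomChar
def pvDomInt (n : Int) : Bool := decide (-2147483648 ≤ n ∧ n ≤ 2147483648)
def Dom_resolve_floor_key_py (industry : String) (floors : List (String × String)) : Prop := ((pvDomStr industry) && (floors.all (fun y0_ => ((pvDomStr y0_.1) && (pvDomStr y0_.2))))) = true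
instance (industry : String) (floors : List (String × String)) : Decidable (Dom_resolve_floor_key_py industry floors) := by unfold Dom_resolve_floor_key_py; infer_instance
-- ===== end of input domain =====

-- B replaces A's four sequential passes over the keys by ONE scan that ranks each key
-- by match quality (0 exact, 1 case-insensitive, 2 separator-normalized, 3 substring)
-- and keeps the earliest key of the best rank; same return value, different decomposition.

-- ===== PORT A =====
-- .replace("_", " ").replace("&", "and") normalization, written verbatim in both Pythons
def pvNorm (s : String) : String :=
  PySem.Str.replace (PySem.Str.replace s "_" " ") "&" "and"

def resolve_floor_key_py (industry : String) (floors : List (String × String)) : String :=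
  let ind := PySem.Str.strip industry
  if PySem.Str.len ind = 0 then "Default"
  else
    let d := PySem.Dict.ofList floors
    if d.contains ind then ind
    else
      let il := PySem.Str.lower ind
      match d.keys.find? (fun key => PySem.Str.lower key == il) with
      | some key => key
      | none =>
        let normalized := pvNorm il
        match d.keys.find? (fun key => pvNorm (PySem.Str.lower key) == normalized) with
        | some key => key
        | none =>
          match d.keys.find? (fun key =>
              PySem.Str.isIn il (PySem.Str.lower key) || PySem.Str.isIn (PySem.Str.lower key) il) with
          | some key => key
          | none => "Default"

-- ===== PORT B =====
-- the if/elif chain ranking one key (none = no match, 'continue' in the Python)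
def pvLevel (ind il nrm key : String) : Option Nat :=
  let kl := PySem.Str.lower key
  if key == ind then some 0
  else if kl == il then some 1
  else if pvNorm kl == nrm then some 2
  else if PySem.Str.isIn il kl || PySem.Str.isIn kl il then some 3
  else none

-- one loop iteration: update best on a strictly better (lower) level
def pvStep (ind il nrm : String) (acc : Option (Nat × String)) (key : String) : Option (Nat × String) :=
  match pvLevel ind il nrm key with
  | none => acc
  | some l =>
    match acc with
    | none => some (l, key)
    | some (bl, bk) => if l < bl then some (l, key) else some (bl, bk)

def resolve_floor_key_py_alt (industry : String) (floors : List (String × String)) : String :=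
  let ind := PySem.Str.strip industry
  if PySem.Str.len ind = 0 then "Default"
  else
    let il := PySem.Str.lower ind
    let nrm := pvNorm il
    match (PySem.Dict.ofList floors).keys.foldl (pvStep ind il nrm) none with
    | some (_, key) => key
    | none => "Default"

-- ===== PRECONDITION & SPEC =====
def Spec_resolve_floor_key_py (industry : String) (floors : List (String × String)) (out : String) : Prop := out = resolve_floor_key_py_alt industry floors
instance (industry : String) (floors : List (String × String)) (out : String) : Decidable (Spec_resolve_floor_key_py industry floors out) := by unfold Spec_resolve_floor_key_py; infer_instance

-- ===== CLAIM (what is proved, stated in full; the proofs are below) =====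
def Claim_equal_resolve_floor_key_py : Prop := ∀ (industry : String) (floors : List (String × String)), Dom_resolve_floor_key_py industry floors → Spec_resolve_floor_key_py industry floors (resolve_floor_key_py industry floors)

-- ===== LEMMAS AND PROOFS =====

-- level of a key w.r.t. a list of predicates: index of the first predicate it satisfies
def pvLvl {α : Type} (ps : List (α → Bool)) (a : α) : Nat := ps.findIdx (fun p => p a)

-- minimum level over a list, with default d
def pvMin {α : Type} (g : α → Nat) (d : Nat) (l : List α) : Nat := (l.map g).foldr min d

-- A's shape: one find? pass per predicate, first hit of the earliest succeeding pass wins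
def pvChain {α : Type} (ps : List (α → Bool)) (l : List α) : Option α :=
  ps.foldr (fun p acc => (l.find? p).orElse (fun _ => acc)) none

-- the four predicates of this task, in A's pass order
def pvPs (ind il nrm : String) : List (String → Bool) :=
  [fun k => k == ind,
   fun k => PySem.Str.lower k == il,
   fun k => pvNorm (PySem.Str.lower k) == nrm,
   fun k => PySem.Str.isIn il (PySem.Str.lower k) || PySem.Str.isIn (PySem.Str.lower k) il]

theorem pvFind_congr {α : Type} {p q : α → Bool} : ∀ (l : List α), (∀ a ∈ l, p a = q a) → l.find? p = l.find? q := by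
  intro l h
  induction l with
  | nil => rfl
  | cons a l ih =>
    simp only [List.find?_cons]
    rw [h a (by simp)]
    cases hq : q a with
    | true => rfl
    | false => exact ih (fun b hb => h b (by simp [hb]))

theorem pvMin_le_default {α : Type} (g : α → Nat) (d : Nat) : ∀ (l : List α), pvMin g d l ≤ d := by
  intro l; induction l with
  | nil => simp [pvMin]
  | cons a l ih => simp only [pvMin, List.map_cons, List.foldr_cons] at *; omega

theorem pvMin_le_of_mem {α : Type} (g : α → Nat) (d : Nat) {a : α} : ∀ {l : List α}, a ∈ l → pvMin g d l ≤ g a := by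
  intro l h
  induction l with
  | nil => simp at h
  | cons b l ih =>
    simp only [pvMin, List.map_cons, List.foldr_cons] at *
    rcases List.mem_cons.1 h with h1 | h1
    · subst h1; omega
    · have := ih h1; omega

theorem pvMin_cons {α : Type} (g : α → Nat) (d : Nat) (a : α) (l : List α) :
    pvMin g d (a :: l) = min (g a) (pvMin g d l) := rfl

theorem pvMin_default_min {α : Type} (g : α → Nat) (c d : Nat) : ∀ (l : List α),
    pvMin g (min c d) l = min c (pvMin g d l) := by
  intro l; induction l with
  | nil => rfl
  | cons a l ih => simp only [pvMin, List.map_cons, List.foldr_cons] at *; omega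

theorem pvMin_succ {α : Type} (g g' : α → Nat) (d : Nat) : ∀ (l : List α), (∀ a ∈ l, g a = g' a + 1) →
    pvMin g (d + 1) l = pvMin g' d l + 1 := by
  intro l h
  induction l with
  | nil => rfl
  | cons a l ih =>
    have ha := h a (by simp)
    have := ih (fun b hb => h b (by simp [hb]))
    simp only [pvMin, List.map_cons, List.foldr_cons] at *
    omega

theorem pvFind_self (ind : String) : ∀ (l : List String),
    l.find? (fun k => k == ind) = if ind ∈ l then some ind else none := by
  intro l
  induction l with
  | nil => rw [if_neg (by simp)]; rfl
  | cons a l ih =>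
    by_cases ha : a = ind
    · subst ha; simp
    · have hb : (a == ind) = false := by simp [ha]
      simp only [List.find?_cons, hb]
      rw [ih]
      have hni : ¬ ind = a := fun h => ha h.symm
      simp [List.mem_cons, hni]

theorem pvLvl_cons {α : Type} (p : α → Bool) (ps : List (α → Bool)) (a : α) :
    pvLvl (p :: ps) a = if p a then 0 else pvLvl ps a + 1 := by
  cases h : p a
  · simp [pvLvl, List.findIdx_cons, h]
  · simp [pvLvl, List.findIdx_cons, h]

-- A's chained passes return the earliest key of the lowest level
theorem pvChain_char {α : Type} : ∀ (ps : List (α → Bool)) (l : List α),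
    pvChain ps l = if pvMin (pvLvl ps) ps.length l < ps.length then
        l.find? (fun a => pvLvl ps a == pvMin (pvLvl ps) ps.length l)
      else none := by
  intro ps
  induction ps with
  | nil => intro l; simp only [List.length_nil]; rw [if_neg (Nat.not_lt_zero _)]; rfl
  | cons p ps ih =>
    intro l
    have hchain : pvChain (p :: ps) l = (l.find? p).orElse (fun _ => pvChain ps l) := rfl
    rw [hchain]
    cases hf : l.find? p with
    | some a0 =>
      have hp : p a0 = true := List.find?_some hf
      have hmem : a0 ∈ l := List.mem_of_find?_eq_some hf
      have hlvl0 : pvLvl (p :: ps) a0 = 0 := by rw [pvLvl_cons, if_pos hp]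
      have hmin0 : pvMin (pvLvl (p :: ps)) (p :: ps).length l = 0 := by
        have := pvMin_le_of_mem (pvLvl (p :: ps)) (p :: ps).length hmem
        omega
      rw [hmin0, if_pos (by simp)]
      have : l.find? (fun a => pvLvl (p :: ps) a == 0) = l.find? p := by
        apply pvFind_congr
        intro a _
        rw [pvLvl_cons]
        cases h : p a
        · simp
        · simp
      rw [this, hf]
      rfl
    | none =>
      have hall : ∀ a ∈ l, p a = false := by
        intro a ha; simpa using List.find?_eq_none.1 hf a ha
      have hshift : ∀ a ∈ l, pvLvl (p :: ps) a = pvLvl ps a + 1 := by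
        intro a ha; rw [pvLvl_cons, if_neg (by simp [hall a ha])]
      have hmin : pvMin (pvLvl (p :: ps)) (ps.length + 1) l = pvMin (pvLvl ps) ps.length l + 1 :=
        pvMin_succ _ _ _ l hshift
      have hlen : (p :: ps).length = ps.length + 1 := rfl
      rw [hlen, hmin]
      rw [ih l]
      by_cases hc : pvMin (pvLvl ps) ps.length l < ps.length
      · rw [if_pos hc, if_pos (by omega)]
        have : l.find? (fun a => pvLvl (p :: ps) a == pvMin (pvLvl ps) ps.length l + 1)
             = l.find? (fun a => pvLvl ps a == pvMin (pvLvl ps) ps.length l) := by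
          apply pvFind_congr
          intro a ha
          rw [hshift a ha]
          simp
        rw [this]
        rfl
      · rw [if_neg hc, if_neg (by omega)]
        rfl

-- B's if/elif level of a key is the index of the first of A's predicates it satisfies
theorem pvLevel_eq_lvl (ind il nrm k : String) :
    pvLevel ind il nrm k = if pvLvl (pvPs ind il nrm) k < 4 then some (pvLvl (pvPs ind il nrm) k) else none := by
  cases h0 : (k == ind) <;>
  cases h1 : (PySem.Str.lower k == il) <;>
  cases h2 : (pvNorm (PySem.Str.lower k) == nrm) <;>
  cases h3 : (PySem.Str.isIn il (PySem.Str.lower k) || PySem.Str.isIn (PySem.Str.lower k) il) <;>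
  simp only [pvLevel, pvLvl, pvPs, List.findIdx_cons, h0, h1, h2, h3, cond_true, cond_false] <;> rfl

-- B's scan from a non-empty accumulator: earliest key strictly below the current level wins
theorem pvFold_some (ind il nrm : String) (g : String → Nat)
    (hg : ∀ k, pvLevel ind il nrm k = if g k < 4 then some (g k) else none) :
    ∀ (l : List String) (bl : Nat) (bk : String), bl ≤ 4 →
    l.foldl (pvStep ind il nrm) (some (bl, bk)) =
      if pvMin g bl l < bl then
        (l.find? (fun a => g a == pvMin g bl l)).map (fun a => (pvMin g bl l, a))
      else some (bl, bk) := by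
  intro l
  induction l with
  | nil => intro bl bk _; simp [pvMin]
  | cons a l ih =>
    intro bl bk hbl
    rw [List.foldl_cons]
    by_cases hga : g a < bl
    · have h4 : g a < 4 := by omega
      have hstep : pvStep ind il nrm (some (bl, bk)) a = some (g a, a) := by
        simp [pvStep, hg a, h4, hga]
      rw [hstep, ih (g a) a (by omega)]
      have hM : pvMin g bl (a :: l) = pvMin g (g a) l := by
        rw [pvMin_cons]
        have := pvMin_default_min g (g a) bl l
        rw [Nat.min_eq_left (by omega)] at this
        omega
      rw [hM]
      have hMle : pvMin g (g a) l ≤ g a := pvMin_le_default g (g a) l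
      by_cases hlt : pvMin g (g a) l < g a
      · rw [if_pos hlt, if_pos (by omega)]
        have hne : (g a == pvMin g (g a) l) = false := by simp; omega
        rw [List.find?_cons, hne]
      · have heq : pvMin g (g a) l = g a := by omega
        rw [if_neg hlt, if_pos (by omega), heq]
        rw [List.find?_cons, show (g a == g a) = true by simp]
        rfl
    · have hstep : pvStep ind il nrm (some (bl, bk)) a = some (bl, bk) := by
        by_cases h4 : g a < 4 <;> simp [pvStep, hg a, h4, hga]
      rw [hstep, ih bl bk hbl]
      have hM : pvMin g bl (a :: l) = pvMin g bl l := by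
        have := pvMin_le_default g bl l
        rw [pvMin_cons]; omega
      rw [hM]
      by_cases hlt : pvMin g bl l < bl
      · rw [if_pos hlt, if_pos hlt]
        have hne : (g a == pvMin g bl l) = false := by simp; omega
        rw [List.find?_cons, hne]
      · rw [if_neg hlt, if_neg hlt]

-- B's whole scan: earliest key achieving the minimal level, none if nothing matches
theorem pvFold_none (ind il nrm : String) (g : String → Nat)
    (hg : ∀ k, pvLevel ind il nrm k = if g k < 4 then some (g k) else none) :
    ∀ (l : List String),
    l.foldl (pvStep ind il nrm) none =
      if pvMin g 4 l < 4 then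
        (l.find? (fun a => g a == pvMin g 4 l)).map (fun a => (pvMin g 4 l, a))
      else none := by
  intro l
  induction l with
  | nil => simp [pvMin]
  | cons a l ih =>
    rw [List.foldl_cons]
    by_cases h4 : g a < 4
    · have hstep : pvStep ind il nrm none a = some (g a, a) := by
        simp [pvStep, hg a, h4]
      rw [hstep, pvFold_some ind il nrm g hg l (g a) a (by omega)]
      have hM : pvMin g 4 (a :: l) = pvMin g (g a) l := by
        rw [pvMin_cons]
        have := pvMin_default_min g (g a) 4 l
        rw [Nat.min_eq_left (by omega)] at this
        omega
      rw [hM]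
      have hMle : pvMin g (g a) l ≤ g a := pvMin_le_default g (g a) l
      by_cases hlt : pvMin g (g a) l < g a
      · rw [if_pos hlt, if_pos (by omega)]
        have hne : (g a == pvMin g (g a) l) = false := by simp; omega
        rw [List.find?_cons, hne]
      · have heq : pvMin g (g a) l = g a := by omega
        rw [if_neg hlt, if_pos (by omega), heq]
        rw [List.find?_cons, show (g a == g a) = true by simp]
        rfl
    · have hstep : pvStep ind il nrm none a = none := by
        simp [pvStep, hg a, h4]
      rw [hstep, ih]
      have hM : pvMin g 4 (a :: l) = pvMin g 4 l := by
        have := pvMin_le_default g 4 l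
        rw [pvMin_cons]; omega
      rw [hM]
      by_cases hlt : pvMin g 4 l < 4
      · rw [if_pos hlt, if_pos hlt]
        have hne : (g a == pvMin g 4 l) = false := by simp; omega
        rw [List.find?_cons, hne]
      · rw [if_neg hlt, if_neg hlt]

-- A is the chain of its four find? passes
theorem pvA_eq_chain (industry : String) (floors : List (String × String))
    (hlen : ¬ PySem.Str.len (PySem.Str.strip industry) = 0) :
    resolve_floor_key_py industry floors =
      match pvChain (pvPs (PySem.Str.strip industry) (PySem.Str.lower (PySem.Str.strip industry))
          (pvNorm (PySem.Str.lower (PySem.Str.strip industry)))) (PySem.Dict.ofList floors).keys with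
      | some k => k
      | none => "Default" := by
  simp only [resolve_floor_key_py, if_neg hlen]
  have hchain : pvChain (pvPs (PySem.Str.strip industry) (PySem.Str.lower (PySem.Str.strip industry))
      (pvNorm (PySem.Str.lower (PySem.Str.strip industry)))) (PySem.Dict.ofList floors).keys
    = ((PySem.Dict.ofList floors).keys.find? (fun k => k == PySem.Str.strip industry)).orElse (fun _ =>
      ((PySem.Dict.ofList floors).keys.find? (fun k => PySem.Str.lower k == PySem.Str.lower (PySem.Str.strip industry))).orElse (fun _ =>
      ((PySem.Dict.ofList floors).keys.find? (fun k => pvNorm (PySem.Str.lower k) == pvNorm (PySem.Str.lower (PySem.Str.strip industry)))).orElse (fun _ =>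
      ((PySem.Dict.ofList floors).keys.find? (fun k => PySem.Str.isIn (PySem.Str.lower (PySem.Str.strip industry)) (PySem.Str.lower k) || PySem.Str.isIn (PySem.Str.lower k) (PySem.Str.lower (PySem.Str.strip industry)))).orElse (fun _ => none)))) := rfl
  rw [hchain, pvFind_self]
  by_cases hmem : PySem.Str.strip industry ∈ (PySem.Dict.ofList floors).keys
  · have hcont : (PySem.Dict.ofList floors).contains (PySem.Str.strip industry) = true :=
      (PySem.Dict.contains_iff_mem_keys _ _).2 hmem
    rw [hcont, if_pos hmem]
    rfl
  · have hcont : (PySem.Dict.ofList floors).contains (PySem.Str.strip industry) = false := by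
      cases hc : (PySem.Dict.ofList floors).contains (PySem.Str.strip industry)
      · rfl
      · exact absurd ((PySem.Dict.contains_iff_mem_keys _ _).1 hc) hmem
    rw [hcont, if_neg hmem]
    simp only [Bool.false_eq_true, if_false, Option.orElse]
    cases (PySem.Dict.ofList floors).keys.find? (fun k => PySem.Str.lower k == PySem.Str.lower (PySem.Str.strip industry)) with
    | some k => rfl
    | none =>
      cases (PySem.Dict.ofList floors).keys.find? (fun k => pvNorm (PySem.Str.lower k) == pvNorm (PySem.Str.lower (PySem.Str.strip industry))) with
      | some k => rfl
      | none =>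
        cases (PySem.Dict.ofList floors).keys.find? (fun k => PySem.Str.isIn (PySem.Str.lower (PySem.Str.strip industry)) (PySem.Str.lower k) || PySem.Str.isIn (PySem.Str.lower k) (PySem.Str.lower (PySem.Str.strip industry))) with
        | some k => rfl
        | none => rfl

theorem pv_main (industry : String) (floors : List (String × String)) :
    resolve_floor_key_py industry floors = resolve_floor_key_py_alt industry floors := by
  by_cases hlen : PySem.Str.len (PySem.Str.strip industry) = 0
  · simp only [resolve_floor_key_py, resolve_floor_key_py_alt, if_pos hlen]
  · rw [pvA_eq_chain industry floors hlen]
    simp only [resolve_floor_key_py_alt, if_neg hlen]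
    rw [pvFold_none (PySem.Str.strip industry) (PySem.Str.lower (PySem.Str.strip industry))
      (pvNorm (PySem.Str.lower (PySem.Str.strip industry)))
      (pvLvl (pvPs (PySem.Str.strip industry) (PySem.Str.lower (PySem.Str.strip industry))
        (pvNorm (PySem.Str.lower (PySem.Str.strip industry)))))
      (pvLevel_eq_lvl _ _ _)]
    rw [pvChain_char]
    have hlen4 : (pvPs (PySem.Str.strip industry) (PySem.Str.lower (PySem.Str.strip industry))
        (pvNorm (PySem.Str.lower (PySem.Str.strip industry)))).length = 4 := rfl
    rw [hlen4]
    by_cases hm : pvMin (pvLvl (pvPs (PySem.Str.strip industry) (PySem.Str.lower (PySem.Str.strip industry))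
        (pvNorm (PySem.Str.lower (PySem.Str.strip industry))))) 4 (PySem.Dict.ofList floors).keys < 4
    · rw [if_pos hm, if_pos hm]
      cases (PySem.Dict.ofList floors).keys.find? (fun a =>
          pvLvl (pvPs (PySem.Str.strip industry) (PySem.Str.lower (PySem.Str.strip industry))
            (pvNorm (PySem.Str.lower (PySem.Str.strip industry)))) a ==
          pvMin (pvLvl (pvPs (PySem.Str.strip industry) (PySem.Str.lower (PySem.Str.strip industry))
            (pvNorm (PySem.Str.lower (PySem.Str.strip industry))))) 4 (PySem.Dict.ofList floors).keys) with
      | some a => rfl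
      | none => rfl
    · rw [if_neg hm, if_neg hm]

-- ===== VERDICT (by name: the statement is the Claim_ definition above) =====
theorem resolve_floor_key_py_spec : Claim_equal_resolve_floor_key_py := by
  intro industry floors _
  unfold Spec_resolve_floor_key_py
  exact pv_main industry floors
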